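-- pv_equiv track=rewrite | github.com/nikitamamay/romashki-ods2latex | src/str_utils.py | slice_until_non_escaped_char
-- ===== SOURCE A (Python) =====
-- def slice_until_non_escaped_char(
-- 		text: str,
-- 	    char: list[str],
-- 	    start_i: int = 0
-- 	    ) -> tuple[str, int]:
-- 	i = start_i
-- 	while i < len(text):
-- 		if text[i] in char:
-- 			if i == 0 or (i > 0 and text[i - 1] != "\\"):
-- 				return (text[start_i : i], i + 1)
-- 		i += 1
-- 	return (text[start_i : ], i)
-- ===== SOURCE B (Python) =====
-- def slice_until_non_escaped_char(
-- 		text: str,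
-- 	    char: list[str],
-- 	    start_i: int = 0
-- 	    ) -> tuple[str, int]:
-- 	# Per-delimiter search: for each single-character delimiter, str.find its first
-- 	# non-escaped occurrence, then take the minimum position over all delimiters.
-- 	n = len(text)
-- 	p0 = max(start_i, 0)
-- 	best = n
-- 	for c in char:
-- 		if len(c) != 1:
-- 			continue
-- 		j = text.find(c, p0)
-- 		while j > 0 and text[j - 1] == "\\":
-- 			j = text.find(c, j + 1)
-- 		if j != -1 and j < best:
-- 			best = j
-- 	if best < n:
-- 		return (text[start_i:best], best + 1)
-- 	return (text[start_i:], max(start_i, n))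
-- ===== Notes on version B (the rewrite author's own statement) =====
-- stated objective: faster
-- what changed: B replaces A's position-by-position while loop (testing text[i] against the whole char list at every index) by a per-delimiter search: for each single-character delimiter it repeatedly calls str.find to locate that delimiter's first non-escaped occurrence, then takes the minimum position over all delimiters; the no-match resume index is the closed form max(start_i, len(text)).
import Mathlib
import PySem

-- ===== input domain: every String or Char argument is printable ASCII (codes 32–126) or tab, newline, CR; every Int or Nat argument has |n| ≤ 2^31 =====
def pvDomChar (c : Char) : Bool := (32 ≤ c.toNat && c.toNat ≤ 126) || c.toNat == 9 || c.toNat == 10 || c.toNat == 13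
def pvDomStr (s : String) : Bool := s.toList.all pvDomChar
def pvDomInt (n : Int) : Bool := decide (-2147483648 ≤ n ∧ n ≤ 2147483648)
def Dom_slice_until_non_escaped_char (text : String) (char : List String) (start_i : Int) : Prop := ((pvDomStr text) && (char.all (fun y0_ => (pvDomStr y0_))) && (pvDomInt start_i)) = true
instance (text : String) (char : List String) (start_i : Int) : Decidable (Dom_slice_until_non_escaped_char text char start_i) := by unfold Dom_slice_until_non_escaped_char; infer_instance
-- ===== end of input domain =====

-- B replaces A's position-by-position while loop (testing text[i] against the whole char list at
-- every index) by a per-delimiter search: for each single-character delimiter, str.find its first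
-- non-escaped occurrence, then take the minimum position over all delimiters.

-- ===== PORT A =====
-- A's while loop: i scans upward while i < len(text); text[i] / text[i-1] via pyGetD
-- (in range on every access A performs when -len(text) ≤ start_i, i.e. inside Pre_).
def pvALoop (t : List Char) (char : List String) (start_i : Int) (i : Int) : String × Int :=
  if _h : i < (t.length : Int) then
    if String.ofList [PySem.List.pyGetD t i ' '] ∈ char then
      if i = 0 ∨ (0 < i ∧ String.ofList [PySem.List.pyGetD t (i - 1) ' '] ≠ "\\") then
        (String.ofList (PySem.List.slice t (some start_i) (some i)), i + 1)
      else pvALoop t char start_i (i + 1)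
    else pvALoop t char start_i (i + 1)
  else (String.ofList (PySem.List.slice t (some start_i) none), i)
termination_by ((t.length : Int) - i).toNat
decreasing_by all_goals omega

def slice_until_non_escaped_char (text : String) (char : List String) (start_i : Int) : String × Int :=
  pvALoop text.toList char start_i start_i

-- ===== PORT B =====
-- termination fact for B's inner while loop: a hit of text.find(c, k) lies in [k, len]
lemma pvFindFrom_bounds (t c : List Char) (k : Nat)
    (h : PySem.Chars.findFrom t c (k : Int) none ≠ -1) :
    k ≤ t.length ∧ (k : Int) ≤ PySem.Chars.findFrom t c (k : Int) none ∧
      PySem.Chars.findFrom t c (k : Int) none ≤ (t.length : Int) := by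
  unfold PySem.Chars.findFrom at h ⊢
  simp only [if_neg (show ¬((k : Int) < 0) by omega), Int.toNat_natCast, List.take_length] at h ⊢
  by_cases hk : (t.length : Int) < (k : Int)
  · rw [if_pos hk] at h
    exact absurd rfl h
  · rw [if_neg hk] at h ⊢
    have hr1 := PySem.Chars.neg_one_le_find (t.drop k) c
    have hr2 := PySem.Chars.find_le_length (t.drop k) c
    rw [List.length_drop] at hr2
    split_ifs at h ⊢ with hfind
    · exact absurd rfl h
    · refine ⟨by omega, by omega, by omega⟩

-- B's inner while loop, started at the pending find: j = text.find(c, k);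
-- while j > 0 and text[j-1] == "\\": j = text.find(c, j + 1)
def pvBInner (t c : List Char) (k : Nat) : Int :=
  let j := PySem.Chars.findFrom t c (k : Int) none
  if _h : 0 < j ∧ String.ofList [PySem.List.pyGetD t (j - 1) ' '] = "\\" then
    pvBInner t c (j.toNat + 1)
  else j
termination_by t.length + 1 - k
decreasing_by
  have hne : PySem.Chars.findFrom t c (k : Int) none ≠ -1 := by omega
  have := pvFindFrom_bounds t c k hne
  omega

-- B's for loop over char: skip multi-char delimiters, keep the smallest found position in best
def pvBOuter (t : List Char) (k : Nat) (best : Int) : List String → Int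
  | [] => best
  | c :: rest =>
    if PySem.Str.len c ≠ 1 then pvBOuter t k best rest
    else
      let j := pvBInner t c.toList k
      if j ≠ -1 ∧ j < best then pvBOuter t k j rest
      else pvBOuter t k best rest

def slice_until_non_escaped_char_alt (text : String) (char : List String) (start_i : Int) : String × Int :=
  let t := text.toList
  let n : Int := t.length
  let p0 : Int := max start_i 0
  let best := pvBOuter t p0.toNat n char
  if best < n then (String.ofList (PySem.List.slice t (some start_i) (some best)), best + 1)
  else (String.ofList (PySem.List.slice t (some start_i) none), max start_i n)

-- ===== PRECONDITION & SPEC =====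
-- Pre_ excludes exactly the inputs where A raises: for start_i < -len(text) (including any
-- negative start_i on empty text) A's first text[i] access is an IndexError.
def Pre_slice_until_non_escaped_char (text : String) (char : List String) (start_i : Int) : Prop :=
  -(PySem.Str.len text) ≤ start_i

instance (text : String) (char : List String) (start_i : Int) : Decidable (Pre_slice_until_non_escaped_char text char start_i) := by unfold Pre_slice_until_non_escaped_char; infer_instance

def pvWitness_slice_until_non_escaped_char : String × List String × Int := ("ab\\,c,d", [",", ";"], 0)

def Spec_slice_until_non_escaped_char (text : String) (char : List String) (start_i : Int) (out : String × Int) : Prop := out = slice_until_non_escaped_char_alt text char start_i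
instance (text : String) (char : List String) (start_i : Int) (out : String × Int) : Decidable (Spec_slice_until_non_escaped_char text char start_i out) := by unfold Spec_slice_until_non_escaped_char; infer_instance

-- ===== CLAIM (what is proved, stated in full; the proofs are below) =====
def Claim_equal_slice_until_non_escaped_char : Prop := ∀ (text : String) (char : List String) (start_i : Int), Dom_slice_until_non_escaped_char text char start_i → Pre_slice_until_non_escaped_char text char start_i → Spec_slice_until_non_escaped_char text char start_i (slice_until_non_escaped_char text char start_i)


-- ===== LEMMAS AND PROOFS =====

-- the "first acceptable position ≥ k" both programs compute, as a find? over the index range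
def pvHit (t : List Char) (char : List String) (k : Nat) : Option Nat :=
  (List.range' k (t.length - k)).find?
    (fun p => decide (String.ofList [t.getD p ' '] ∈ char ∧
      (p = 0 ∨ String.ofList [t.getD (p - 1) ' '] ≠ "\\")))

-- generic find?-over-range' facts
lemma pvFind?_range'_none {p : Nat → Bool} {k n : Nat}
    (h : ∀ q, k ≤ q → q < k + n → p q = false) :
    (List.range' k n).find? p = none := by
  rw [List.find?_eq_none]
  intro x hx
  rw [List.mem_range'_1] at hx
  exact fun hp => by simp [h x hx.1 hx.2] at hp

lemma pvFind?_range'_some {p : Nat → Bool} {k n m : Nat}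
    (hkm : k ≤ m) (hmn : m < k + n) (hp : p m = true)
    (hmin : ∀ q, k ≤ q → q < m → p q = false) :
    (List.range' k n).find? p = some m := by
  induction n generalizing k with
  | zero => omega
  | succ n ih =>
    rw [List.range'_succ, List.find?_cons]
    by_cases hk : m = k
    · subst hk; simp [hp]
    · have : p k = false := hmin k le_rfl (by omega)
      simp only [this]
      exact ih (by omega) (by omega) (fun q hq1 hq2 => hmin q (by omega) hq2)

lemma pvFind?_range'_shift {p : Nat → Bool} {k k' n : Nat}
    (hkk : k ≤ k') (hk'n : k' ≤ n)
    (h : ∀ q, k ≤ q → q < k' → p q = false) :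
    (List.range' k (n - k)).find? p = (List.range' k' (n - k')).find? p := by
  have hsplit : List.range' k (n - k) = List.range' k (k' - k) ++ List.range' k' (n - k') := by
    have h1 := List.range'_append_1 (s := k) (m := k' - k) (n := n - k')
    rw [show k + (k' - k) = k' from by omega] at h1
    rw [h1]
    congr 1
    omega
  rw [hsplit, List.find?_append]
  have : (List.range' k (k' - k)).find? p = none := by
    apply pvFind?_range'_none
    intro q hq1 hq2
    exact h q hq1 (by omega)
  rw [this, Option.none_or]

-- occurrences of a single character as prefixes of drops
lemma pvPrefix_drop_iff (t : List Char) (c : Char) (p : Nat) :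
    [c] <+: t.drop p ↔ p < t.length ∧ t.getD p ' ' = c := by
  constructor
  · intro h
    have hlen := h.length_le
    simp only [List.length_cons, List.length_nil, List.length_drop] at hlen
    have hp : p < t.length := by omega
    obtain ⟨s, hs⟩ := h
    have hd : (t.drop p).head? = some c := by rw [← hs]; rfl
    rw [List.head?_drop] at hd
    refine ⟨hp, ?_⟩
    rw [List.getD_eq_getElem t ' ' hp]
    rw [List.getElem?_eq_getElem hp] at hd
    exact Option.some.inj hd
  · rintro ⟨hp, hc⟩
    rw [List.getD_eq_getElem t ' ' hp] at hc
    have : t.drop p = c :: t.drop (p + 1) := by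
      rw [List.drop_eq_getElem_cons hp, hc]
    rw [this]
    exact ⟨t.drop (p + 1), rfl⟩

-- characterization of A's loop from a nonnegative index
lemma pvALoop_eq_hit (t : List Char) (char : List String) (start_i : Int) (k : Nat) :
    pvALoop t char start_i (k : Int) =
      match pvHit t char k with
      | some p => (String.ofList (PySem.List.slice t (some start_i) (some (p : Int))), (p : Int) + 1)
      | none => (String.ofList (PySem.List.slice t (some start_i) none), max (k : Int) (t.length : Int)) := by
  induction hfuel : t.length - k generalizing k with
  | zero =>
    have hk : t.length ≤ k := by omega
    unfold pvHit
    rw [hfuel, List.range'_zero]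
    rw [pvALoop, dif_neg (by omega : ¬ ((k : Int) < (t.length : Int)))]
    dsimp only [List.find?]
    congr 1
    omega
  | succ m ih =>
    have hk : k < t.length := by omega
    unfold pvHit
    rw [hfuel, List.range'_succ]
    rw [pvALoop, dif_pos (by omega : (k : Int) < (t.length : Int))]
    rw [PySem.List.pyGetD_natCast]
    have hesc_iff : ((k : Int) = 0 ∨ (0 < (k : Int) ∧ String.ofList [PySem.List.pyGetD t ((k : Int) - 1) ' '] ≠ "\\")) ↔
        (k = 0 ∨ String.ofList [t.getD (k - 1) ' '] ≠ "\\") := by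
      cases k with
      | zero => simp
      | succ k' =>
        have h1 : ((k' + 1 : Nat) : Int) - 1 = ((k' : Nat) : Int) := by push_cast; omega
        rw [h1, PySem.List.pyGetD_natCast]
        constructor
        · rintro (h | ⟨_, h⟩)
          · omega
          · exact Or.inr h
        · rintro (h | h)
          · omega
          · exact Or.inr ⟨by positivity, h⟩
    have htail : List.range' (k + 1) m = List.range' (k + 1) (t.length - (k + 1)) := by
      congr 1
      omega
    by_cases hmem : String.ofList [t.getD k ' '] ∈ char
    · rw [if_pos hmem]
      by_cases hesc : k = 0 ∨ String.ofList [t.getD (k - 1) ' '] ≠ "\\"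
      · rw [if_pos (hesc_iff.mpr hesc)]
        have hpred : decide (String.ofList [t.getD k ' '] ∈ char ∧
            (k = 0 ∨ String.ofList [t.getD (k - 1) ' '] ≠ "\\")) = true := by
          simp only [decide_eq_true_eq]
          exact ⟨hmem, hesc⟩
        simp only [List.find?_cons, hpred]
      · rw [if_neg (fun h => hesc (hesc_iff.mp h))]
        have hpred : decide (String.ofList [t.getD k ' '] ∈ char ∧
            (k = 0 ∨ String.ofList [t.getD (k - 1) ' '] ≠ "\\")) = false := by
          simp only [decide_eq_false_iff_not]
          rintro ⟨_, h2⟩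
          exact hesc h2
        simp only [List.find?_cons, hpred]
        rw [htail]
        have hrec : ((k : Int) + 1) = (((k + 1 : Nat)) : Int) := by push_cast; ring
        rw [hrec, ih (k + 1) (by omega)]
        unfold pvHit
        cases hh : (List.range' (k + 1) (t.length - (k + 1))).find?
            (fun p => decide (String.ofList [t.getD p ' '] ∈ char ∧
              (p = 0 ∨ String.ofList [t.getD (p - 1) ' '] ≠ "\\"))) with
        | some p => rfl
        | none =>
          dsimp only
          congr 1
          omega
    · rw [if_neg hmem]
      have hpred : decide (String.ofList [t.getD k ' '] ∈ char ∧
          (k = 0 ∨ String.ofList [t.getD (k - 1) ' '] ≠ "\\")) = false := by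
        simp only [decide_eq_false_iff_not]
        rintro ⟨h1, _⟩
        exact hmem h1
      simp only [List.find?_cons, hpred]
      rw [htail]
      have hrec : ((k : Int) + 1) = (((k + 1 : Nat)) : Int) := by push_cast; ring
      rw [hrec, ih (k + 1) (by omega)]
      unfold pvHit
      cases hh : (List.range' (k + 1) (t.length - (k + 1))).find?
          (fun p => decide (String.ofList [t.getD p ' '] ∈ char ∧
            (p = 0 ∨ String.ofList [t.getD (p - 1) ' '] ≠ "\\"))) with
      | some p => rfl
      | none =>
        dsimp only
        congr 1
        omega

-- find? over range' finds nothing below its result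
lemma pvFind?_range'_min {p : Nat → Bool} {k n m : Nat}
    (h : (List.range' k n).find? p = some m) :
    ∀ q, k ≤ q → q < m → p q = false := by
  induction n generalizing k with
  | zero => rw [List.range'_zero] at h; simp at h
  | succ n ih =>
    rw [List.range'_succ, List.find?_cons] at h
    cases hpk : p k with
    | true =>
      rw [hpk] at h
      have hm : m = k := by
        have := Option.some.inj h
        omega
      intro q hq1 hq2
      omega
    | false =>
      rw [hpk] at h
      intro q hq1 hq2
      by_cases hqk : q = k
      · subst hqk; exact hpk
      · exact ih h q (by omega) hq2

-- str.find(c, k) characterized as the first single-character occurrence at index ≥ k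
lemma pvFindFrom_char (t : List Char) (c : Char) (k : Nat) :
    PySem.Chars.findFrom t [c] (k : Int) none =
      match (List.range' k (t.length - k)).find? (fun p => decide (t.getD p ' ' = c)) with
      | some p => (p : Int)
      | none => -1 := by
  by_cases hk : t.length < k
  · unfold PySem.Chars.findFrom
    simp only [if_neg (show ¬((k : Int) < 0) by omega)]
    rw [if_pos (by omega : (t.length : Int) < (k : Int))]
    rw [show t.length - k = 0 from by omega, List.range'_zero]
    rfl
  · push_neg at hk
    rw [PySem.Chars.findFrom_natCast t [c] k hk]
    by_cases hf : PySem.Chars.find (t.drop k) [c] = -1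
    · rw [if_pos hf]
      rw [PySem.Chars.find_eq_neg_one_iff] at hf
      have hnone : (List.range' k (t.length - k)).find? (fun p => decide (t.getD p ' ' = c)) = none := by
        apply pvFind?_range'_none
        intro q hq1 hq2
        simp only [decide_eq_false_iff_not]
        intro hval
        apply hf
        have hpre : [c] <+: t.drop q := (pvPrefix_drop_iff t c q).mpr ⟨by omega, hval⟩
        have hdq : t.drop q = (t.drop k).drop (q - k) := by
          rw [List.drop_drop]
          congr 1
          omega
        rw [hdq] at hpre
        rw [← PySem.Chars.isIn_iff_infix]
        rw [← PySem.Chars.exists_prefix_drop_iff_isIn]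
        exact ⟨q - k, hpre⟩
      rw [hnone]
    · rw [if_neg hf]
      have h0 : 0 ≤ PySem.Chars.find (t.drop k) [c] := by
        have := PySem.Chars.neg_one_le_find (t.drop k) [c]
        omega
      obtain ⟨hpre, hmin⟩ := PySem.Chars.find_spec h0
      set r := (PySem.Chars.find (t.drop k) [c]).toNat with hr
      have hdq : (t.drop k).drop r = t.drop (k + r) := by
        rw [List.drop_drop, Nat.add_comm]
      rw [hdq] at hpre
      have hq := (pvPrefix_drop_iff t c (k + r)).mp hpre
      have hsome : (List.range' k (t.length - k)).find? (fun p => decide (t.getD p ' ' = c)) = some (k + r) := by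
        apply pvFind?_range'_some (by omega) (by omega)
        · simp only [decide_eq_true_eq]
          exact hq.2
        · intro q hq1 hq2
          simp only [decide_eq_false_iff_not]
          intro hval
          have hpq : [c] <+: t.drop q := (pvPrefix_drop_iff t c q).mpr ⟨by omega, hval⟩
          have hdq2 : t.drop q = (t.drop k).drop (q - k) := by
            rw [List.drop_drop]
            congr 1
            omega
          rw [hdq2] at hpq
          exact hmin (q - k) (by omega) hpq
      rw [hsome]
      dsimp only
      have hfind : ((r : Nat) : Int) = PySem.Chars.find (t.drop k) [c] := by
        rw [hr]
        exact Int.toNat_of_nonneg h0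
      rw [← hfind]
      push_cast
      ring

-- characterization of B's inner while loop: the first non-escaped occurrence of c at index ≥ k
lemma pvBInner_eq (t : List Char) (c : Char) (k : Nat) :
    pvBInner t [c] k =
      match (List.range' k (t.length - k)).find?
          (fun p => decide (t.getD p ' ' = c ∧
            (p = 0 ∨ String.ofList [t.getD (p - 1) ' '] ≠ "\\"))) with
      | some p => (p : Int)
      | none => -1 := by
  suffices H : ∀ (fuel kk : Nat), t.length + 1 - kk ≤ fuel →
      pvBInner t [c] kk =
        match (List.range' kk (t.length - kk)).find?
            (fun p => decide (t.getD p ' ' = c ∧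
              (p = 0 ∨ String.ofList [t.getD (p - 1) ' '] ≠ "\\"))) with
        | some p => (p : Int)
        | none => -1 by
    exact H (t.length + 1 - k) k le_rfl
  intro fuel
  induction fuel with
  | zero =>
    intro kk hkk
    have hgt : t.length < kk := by omega
    rw [pvBInner]
    simp only [pvFindFrom_char]
    rw [show t.length - kk = 0 from by omega, List.range'_zero]
    dsimp only [List.find?]
    norm_num
  | succ fuel ih =>
    intro kk hkk
    rw [pvBInner]
    simp only [pvFindFrom_char]
    cases hper : (List.range' kk (t.length - kk)).find? (fun p => decide (t.getD p ' ' = c)) with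
    | none =>
      dsimp only
      rw [dif_neg (by rintro ⟨h1, _⟩; omega)]
      have hall := List.find?_eq_none.mp hper
      have hnone : (List.range' kk (t.length - kk)).find?
          (fun p => decide (t.getD p ' ' = c ∧
            (p = 0 ∨ String.ofList [t.getD (p - 1) ' '] ≠ "\\"))) = none := by
        apply List.find?_eq_none.mpr
        intro x hx
        have h1 := hall x hx
        simp only [decide_eq_true_eq] at h1 ⊢
        intro hcontra
        exact h1 hcontra.1
      rw [hnone]
    | some p =>
      have hmem := List.mem_of_find?_eq_some hper
      rw [List.mem_range'_1] at hmem
      have hplen : p < t.length := by omega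
      have hpc : t.getD p ' ' = c := by
        have := List.find?_some hper
        simpa using this
      have hminc : ∀ q, kk ≤ q → q < p → ¬ t.getD q ' ' = c := by
        intro q hq1 hq2
        have := pvFind?_range'_min hper q hq1 hq2
        simpa using this
      dsimp only
      split_ifs with hg
      · -- escaped hit: skip past it and continue
        obtain ⟨hg1, hg2⟩ := hg
        have hp0 : p ≠ 0 := by
          intro h
          subst h
          simp at hg1
        have hcast : ((p : Int) - 1) = (((p - 1 : Nat)) : Int) := by omega
        rw [hcast, PySem.List.pyGetD_natCast] at hg2
        rw [show ((p : Int)).toNat + 1 = p + 1 from by omega]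
        rw [ih (p + 1) (by omega)]
        have hshift := pvFind?_range'_shift (p := fun p => decide (t.getD p ' ' = c ∧
            (p = 0 ∨ String.ofList [t.getD (p - 1) ' '] ≠ "\\")))
          (show kk ≤ p + 1 by omega) (show p + 1 ≤ t.length by omega)
          (by
            intro q hq1 hq2
            simp only [decide_eq_false_iff_not]
            rintro ⟨hqc, hqe⟩
            by_cases hqp : q = p
            · subst hqp
              rcases hqe with h | h
              · exact hp0 h
              · exact h hg2
            · exact hminc q hq1 (by omega) hqc)
        rw [hshift]
      · -- non-escaped hit: this is the answer
        have hesc : p = 0 ∨ String.ofList [t.getD (p - 1) ' '] ≠ "\\" := by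
          by_cases hp0 : p = 0
          · exact Or.inl hp0
          · refine Or.inr fun hcontra => hg ⟨?_, ?_⟩
            · exact_mod_cast Nat.pos_of_ne_zero hp0
            · have hcast : ((p : Int) - 1) = (((p - 1 : Nat)) : Int) := by omega
              rw [hcast, PySem.List.pyGetD_natCast]
              exact hcontra
        have hsome : (List.range' kk (t.length - kk)).find?
            (fun p => decide (t.getD p ' ' = c ∧
              (p = 0 ∨ String.ofList [t.getD (p - 1) ' '] ≠ "\\"))) = some p := by
          apply pvFind?_range'_some (by omega) (by omega)
          · simp only [decide_eq_true_eq]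
            exact ⟨hpc, hesc⟩
          · intro q hq1 hq2
            simp only [decide_eq_false_iff_not]
            rintro ⟨hqc, _⟩
            exact hminc q hq1 hq2 hqc
        rw [hsome]

-- acceptable positions: combined over char, and for one single character
def pvOk (t : List Char) (char : List String) (k p : Nat) : Prop :=
  k ≤ p ∧ p < t.length ∧ String.ofList [t.getD p ' '] ∈ char ∧
    (p = 0 ∨ String.ofList [t.getD (p - 1) ' '] ≠ "\\")

def pvOkC (t : List Char) (c : Char) (k p : Nat) : Prop :=
  k ≤ p ∧ p < t.length ∧ t.getD p ' ' = c ∧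
    (p = 0 ∨ String.ofList [t.getD (p - 1) ' '] ≠ "\\")

lemma pvHit_some (t : List Char) (char : List String) (k p : Nat)
    (hm : pvHit t char k = some p) :
    pvOk t char k p ∧ ∀ q, pvOk t char k q → p ≤ q := by
  unfold pvHit at hm
  have hmem := List.mem_of_find?_eq_some hm
  rw [List.mem_range'_1] at hmem
  have hpred := List.find?_some hm
  simp only [decide_eq_true_eq] at hpred
  have hmin := pvFind?_range'_min hm
  refine ⟨⟨by omega, by omega, hpred.1, hpred.2⟩, ?_⟩
  intro q hq
  by_contra hlt
  have := hmin q hq.1 (by omega)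
  simp only [decide_eq_false_iff_not] at this
  exact this ⟨hq.2.2.1, hq.2.2.2⟩

lemma pvHit_none (t : List Char) (char : List String) (k : Nat)
    (hm : pvHit t char k = none) : ∀ q, ¬ pvOk t char k q := by
  unfold pvHit at hm
  intro q hq
  obtain ⟨ha, hb, hc, hd⟩ := hq
  have := List.find?_eq_none.mp hm q (by rw [List.mem_range'_1]; omega)
  simp only [decide_eq_true_eq] at this
  exact this ⟨hc, hd⟩

lemma pvBInner_cases (t : List Char) (c : Char) (k : Nat) :
    pvBInner t [c] k = -1 ∨ ∃ p : Nat, pvBInner t [c] k = (p : Int) ∧ pvOkC t c k p := by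
  rw [pvBInner_eq]
  cases hf : (List.range' k (t.length - k)).find?
      (fun p => decide (t.getD p ' ' = c ∧
        (p = 0 ∨ String.ofList [t.getD (p - 1) ' '] ≠ "\\"))) with
  | none => exact Or.inl rfl
  | some p =>
    right
    refine ⟨p, rfl, ?_⟩
    have hmem := List.mem_of_find?_eq_some hf
    rw [List.mem_range'_1] at hmem
    have hpred := List.find?_some hf
    simp only [decide_eq_true_eq] at hpred
    exact ⟨by omega, by omega, hpred.1, hpred.2⟩

lemma pvBInner_le (t : List Char) (c : Char) (k q : Nat) (hq : pvOkC t c k q) :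
    ∃ p : Nat, pvBInner t [c] k = (p : Int) ∧ p ≤ q := by
  obtain ⟨ha, hb, hc, hd⟩ := hq
  rw [pvBInner_eq]
  cases hf : (List.range' k (t.length - k)).find?
      (fun p => decide (t.getD p ' ' = c ∧
        (p = 0 ∨ String.ofList [t.getD (p - 1) ' '] ≠ "\\"))) with
  | none =>
    exfalso
    have := List.find?_eq_none.mp hf q (by rw [List.mem_range'_1]; omega)
    simp only [decide_eq_true_eq] at this
    exact this ⟨hc, hd⟩
  | some p =>
    refine ⟨p, rfl, ?_⟩
    by_contra hlt
    have := pvFind?_range'_min hf q ha (by omega)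
    simp only [decide_eq_false_iff_not] at this
    exact this ⟨hc, hd⟩

lemma pvSingle (c : String) (h : PySem.Str.len c = 1) :
    ∃ ch, c.toList = [ch] ∧ c = String.ofList [ch] := by
  simp only [PySem.Str.len_eq] at h
  have hl : c.toList.length = 1 := by exact_mod_cast h
  obtain ⟨ch, hch⟩ := List.length_eq_one_iff.mp hl
  exact ⟨ch, hch, by rw [← hch, String.ofList_toList]⟩

-- invariant of B's for loop: best is len(text) or an acceptable position, and every
-- acceptable position either still has its delimiter pending in cs or is ≥ best
lemma pvBOuter_inv (t : List Char) (char : List String) (k : Nat) :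
    ∀ (cs : List String) (best : Int),
      (∀ x ∈ cs, x ∈ char) →
      (best = (t.length : Int) ∨ ∃ p : Nat, best = (p : Int) ∧ pvOk t char k p) →
      (∀ q, pvOk t char k q →
        (∃ cc, cc ∈ cs ∧ PySem.Str.len cc = 1 ∧ cc = String.ofList [t.getD q ' ']) ∨
          best ≤ (q : Int)) →
      pvBOuter t k best cs =
        match pvHit t char k with
        | some p => (p : Int)
        | none => (t.length : Int) := by
  intro cs
  induction cs with
  | nil =>
    intro best _hsub hbest hcover
    show best = _
    cases hm : pvHit t char k with
    | some p =>
      obtain ⟨hok, hmin⟩ := pvHit_some t char k p hm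
      dsimp only
      rcases hcover p hok with ⟨cc, hcc, _, _⟩ | hle
      · simp at hcc
      · rcases hbest with hb | ⟨p', hb, hok'⟩
        · have hplen := hok.2.1
          omega
        · have hpp := hmin p' hok'
          omega
    | none =>
      dsimp only
      rcases hbest with hb | ⟨p', hb, hok'⟩
      · exact hb
      · exact absurd hok' (pvHit_none t char k hm p')
  | cons c rest ih =>
    intro best hsub hbest hcover
    simp only [pvBOuter]
    by_cases h1 : PySem.Str.len c ≠ 1
    · rw [if_pos h1]
      apply ih best (fun x hx => hsub x (List.mem_cons_of_mem _ hx)) hbest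
      intro q hq
      rcases hcover q hq with ⟨cc, hcc, hcl, hceq⟩ | hle
      · rcases List.mem_cons.mp hcc with rfl | hrest
        · exact absurd hcl h1
        · exact Or.inl ⟨cc, hrest, hcl, hceq⟩
      · exact Or.inr hle
    · push_neg at h1
      rw [if_neg (not_not_intro h1)]
      obtain ⟨ch, hch, hcs⟩ := pvSingle c h1
      rw [hch]
      have hchar : ∀ q, pvOk t char k q → String.ofList [t.getD q ' '] = c →
          pvOkC t ch k q := by
        intro q hq hqs
        have : t.getD q ' ' = ch := by
          have h2 : String.ofList [t.getD q ' '] = String.ofList [ch] := by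
            rw [hqs, hcs]
          have h3 := congrArg String.toList h2
          simp only [String.toList_ofList] at h3
          exact (List.cons_eq_cons.mp h3).1
        exact ⟨hq.1, hq.2.1, this, hq.2.2.2⟩
      by_cases hg : pvBInner t [ch] k ≠ -1 ∧ pvBInner t [ch] k < best
      · rw [if_pos hg]
        rcases pvBInner_cases t ch k with hj | ⟨p, hj, hok⟩
        · exact absurd hj hg.1
        · apply ih _ (fun x hx => hsub x (List.mem_cons_of_mem _ hx))
          · right
            refine ⟨p, hj, hok.1, hok.2.1, ?_, hok.2.2.2⟩
            rw [hok.2.2.1, ← hcs]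
            exact hsub c List.mem_cons_self
          · intro q hq
            rcases hcover q hq with ⟨cc, hcc, hcl, hceq⟩ | hle
            · rcases List.mem_cons.mp hcc with rfl | hrest
              · right
                obtain ⟨p2, hp2, hp2le⟩ := pvBInner_le t ch k q (hchar q hq hceq.symm)
                rw [hp2]
                exact_mod_cast hp2le
              · exact Or.inl ⟨cc, hrest, hcl, hceq⟩
            · right
              have := hg.2
              omega
      · rw [if_neg hg]
        apply ih best (fun x hx => hsub x (List.mem_cons_of_mem _ hx)) hbest
        intro q hq
        rcases hcover q hq with ⟨cc, hcc, hcl, hceq⟩ | hle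
        · rcases List.mem_cons.mp hcc with rfl | hrest
          · right
            obtain ⟨p2, hp2, hp2le⟩ := pvBInner_le t ch k q (hchar q hq hceq.symm)
            have hjne : pvBInner t [ch] k ≠ -1 := by
              rw [hp2]
              omega
            have hble : best ≤ pvBInner t [ch] k := by
              by_contra hlt
              exact hg ⟨hjne, by omega⟩
            rw [hp2] at hble
            omega
          · exact Or.inl ⟨cc, hrest, hcl, hceq⟩
        · exact Or.inr hle

-- B's fold computes the combined first hit when started at best = len(text)
lemma pvBOuter_eq_hit (t : List Char) (char : List String) (k : Nat) :
    pvBOuter t k (t.length : Int) char =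
      match pvHit t char k with
      | some p => (p : Int)
      | none => (t.length : Int) := by
  apply pvBOuter_inv t char k char ((t.length : Int)) (fun x hx => hx) (Or.inl rfl)
  intro q hq
  left
  refine ⟨String.ofList [t.getD q ' '], hq.2.2.1, ?_, rfl⟩
  simp [PySem.Str.len_eq, String.toList_ofList]

-- for negative i A's loop only steps: the escape test 'i == 0 or i > 0 and …' is false on i < 0
lemma pvALoop_neg_step (t : List Char) (char : List String) (start_i i : Int) (hneg : i < 0) :
    pvALoop t char start_i i = pvALoop t char start_i (i + 1) := by
  rw [pvALoop]
  have hlt : i < (t.length : Int) := by omega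
  rw [dif_pos hlt]
  have hesc : ¬ (i = 0 ∨ (0 < i ∧ String.ofList [PySem.List.pyGetD t (i - 1) ' '] ≠ "\\")) := by
    rintro (h | ⟨h, _⟩) <;> omega
  by_cases hm : String.ofList [PySem.List.pyGetD t i ' '] ∈ char
  · rw [if_pos hm, if_neg hesc]
  · rw [if_neg hm]

lemma pvALoop_neg (t : List Char) (char : List String) (start_i : Int) :
    ∀ (kk : Nat), pvALoop t char start_i (-(kk : Int)) = pvALoop t char start_i 0 := by
  intro kk
  induction kk with
  | zero => norm_num
  | succ kk ih =>
    have h := pvALoop_neg_step t char start_i (-(kk + 1 : Nat)) (by push_cast; omega)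
    rw [h]
    have : (-(kk + 1 : Nat) : Int) + 1 = -(kk : Int) := by push_cast; omega
    rw [this, ih]

-- ===== VERDICT (by name: the statement is the Claim_ definition above) =====
theorem slice_until_non_escaped_char_spec : Claim_equal_slice_until_non_escaped_char := by
  intro text char start_i _hdom hpre
  unfold Spec_slice_until_non_escaped_char
  unfold Pre_slice_until_non_escaped_char at hpre
  simp only [PySem.Str.len_eq] at hpre
  show pvALoop text.toList char start_i start_i = slice_until_non_escaped_char_alt text char start_i
  unfold slice_until_non_escaped_char_alt
  set t := text.toList with ht
  simp only
  -- A's loop from start_i equals A's loop from max(start_i, 0)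
  have hA : pvALoop t char start_i start_i = pvALoop t char start_i ((max start_i 0).toNat : Int) := by
    by_cases h0 : 0 ≤ start_i
    · congr 1; omega
    · push_neg at h0
      have hneg := pvALoop_neg t char start_i (-start_i).toNat
      have hcast : (-((-start_i).toNat : Int)) = start_i := by omega
      rw [hcast] at hneg
      rw [hneg]
      congr 1
      omega
  rw [hA, pvALoop_eq_hit t char start_i (max start_i 0).toNat,
      pvBOuter_eq_hit t char (max start_i 0).toNat]
  have hk : ((max start_i 0).toNat : Int) = max start_i 0 := by omega
  cases hm : pvHit t char (max start_i 0).toNat with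
  | some p =>
    have hmem := List.mem_of_find?_eq_some hm
    rw [List.mem_range'_1] at hmem
    have hp : ((p : Int)) < (t.length : Int) := by
      have : p < t.length := by omega
      exact_mod_cast this
    dsimp only
    rw [if_pos hp]
  | none =>
    dsimp only
    rw [if_neg (lt_irrefl _)]
    congr 1
    omega
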